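-- pv_equiv track=rewrite | github.com/cgevans/qslib | src/qslib/protocol.py | _oxfordlist
-- ===== SOURCE A (Python) =====
-- from typing import (
--     TYPE_CHECKING,
--     Any,
--     Callable,
--     ClassVar,
--     Collection,
--     Generic,
--     Iterable,
--     List,
--     Optional,
--     Sequence,
--     Tuple,
--     Type,
--     TypeVar,
--     Union,
--     cast,
--     overload,
-- )
--
-- def _oxfordlist(iterable: Iterable[str]) -> str:
--     x = iter(iterable)
--     try:
--         s = next(x)  # we know the first will be there
--     except StopIteration:
--         return ""
--     try:
--         maybeult = next(x)
--     except StopIteration: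
--         return s
--     try:
--         nextult = next(x)
--         s = s + ", " + maybeult
--         maybeult = nextult
--     except StopIteration:
--         return s + " and " + maybeult
--     while True:
--         try:
--             nextult = next(x)
--             s = s + ", " + maybeult
--             maybeult = nextult
--         except StopIteration:
--             return s + ", and " + maybeult
-- ===== SOURCE B (Python) =====
-- def _oxfordlist(iterable):
--     items = list(iterable)
--     n = len(items)
--     if n == 0:
--         return ""
--     if n == 1:
--         return items[0]
--     if n == 2:
--         return items[0] + " and " + items[1]
--     return ", ".join(items[:-1]) + ", and " + items[-1]
-- ===== Notes on version B (the rewrite author's own statement) =====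
-- stated objective: faster
-- what changed: Replaces the streaming iterator with try/except lookahead buffering and repeated string concatenation by materializing the list once, branching on its length, and producing the 3+ case with a single join over the leading slice.
import Mathlib
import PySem

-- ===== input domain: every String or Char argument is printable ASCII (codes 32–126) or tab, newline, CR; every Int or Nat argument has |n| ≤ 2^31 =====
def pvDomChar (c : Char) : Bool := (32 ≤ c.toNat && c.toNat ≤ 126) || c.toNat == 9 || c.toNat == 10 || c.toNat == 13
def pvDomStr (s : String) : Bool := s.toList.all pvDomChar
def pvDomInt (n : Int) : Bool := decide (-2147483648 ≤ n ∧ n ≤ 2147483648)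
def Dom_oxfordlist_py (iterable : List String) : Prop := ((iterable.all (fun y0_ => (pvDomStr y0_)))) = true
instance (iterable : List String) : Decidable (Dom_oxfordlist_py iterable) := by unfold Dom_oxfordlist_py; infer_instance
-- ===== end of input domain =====

-- ===== PORT A =====
-- B materializes the list and branches on length instead of A's iterator-with-lookahead; same return value everywhere.
-- loop of A: state (s, maybeult), consuming the rest of the iterator
def oxfordlistLoopA (s maybeult : String) : List String → String
  | [] => s ++ ", and " ++ maybeult
  | nextult :: rest => oxfordlistLoopA (s ++ ", " ++ maybeult) nextult rest

def oxfordlist_py (iterable : List String) : String :=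
  match iterable with
  | [] => ""                                    -- first next() raises StopIteration
  | [s] => s                                    -- second next() raises
  | [s, maybeult] => s ++ " and " ++ maybeult   -- third next() raises
  | s :: maybeult :: nextult :: rest =>
      oxfordlistLoopA (s ++ ", " ++ maybeult) nextult rest

-- ===== PORT B =====
def oxfordlist_py_alt (iterable : List String) : String :=
  if iterable.length = 0 then ""
  else if iterable.length = 1 then iterable.headI
  else if iterable.length = 2 then iterable.headI ++ " and " ++ iterable.getLast!
  else PySem.Str.join ", " iterable.dropLast ++ ", and " ++ iterable.getLast!

-- ===== PRECONDITION & SPEC =====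
def Spec_oxfordlist_py (iterable : List String) (out : String) : Prop := out = oxfordlist_py_alt iterable
instance (iterable : List String) (out : String) : Decidable (Spec_oxfordlist_py iterable out) := by unfold Spec_oxfordlist_py; infer_instance

-- ===== CLAIM (what is proved, stated in full; the proofs are below) =====
def Claim_equal_oxfordlist_py : Prop := ∀ (iterable : List String), Dom_oxfordlist_py iterable → Spec_oxfordlist_py iterable (oxfordlist_py iterable)

-- ===== LEMMAS AND PROOFS =====

-- ===== VERDICT (by name: the statement is the Claim_ definition above) =====
lemma join_cons₂ (a b : String) (l : List String) :
    PySem.Str.join ", " (a :: b :: l) = a ++ ", " ++ PySem.Str.join ", " (b :: l) := by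
  apply String.toList_injective
  simp [PySem.Chars.join_cons_cons]

lemma join_prepend (s m : String) (l : List String) :
    PySem.Str.join ", " ((s ++ ", " ++ m) :: l) = PySem.Str.join ", " (s :: m :: l) := by
  cases l with
  | nil =>
      apply String.toList_injective
      simp [PySem.Chars.join_singleton, PySem.Chars.join_cons_cons]
  | cons c cs =>
      rw [join_cons₂, join_cons₂ s, join_cons₂ m]
      simp [String.append_assoc]

lemma loopA_eq (s m : String) (rest : List String) :
    oxfordlistLoopA s m rest =
      PySem.Str.join ", " (s :: (m :: rest).dropLast) ++ ", and " ++ (m :: rest).getLast! := by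
  induction rest generalizing s m with
  | nil =>
      apply String.toList_injective
      simp [oxfordlistLoopA, PySem.Chars.join_singleton, List.getLast!]
  | cons n r ih =>
      simp only [oxfordlistLoopA, ih, List.dropLast_cons₂, join_prepend]
      simp [List.getLast!]

theorem oxfordlist_py_spec : Claim_equal_oxfordlist_py := by
  intro iterable _
  unfold Spec_oxfordlist_py oxfordlist_py oxfordlist_py_alt
  match iterable with
  | [] => rfl
  | [s] => rfl
  | [s, m] => rfl
  | s :: m :: n :: rest =>
      simp only [loopA_eq, join_prepend, List.dropLast_cons₂]
      simp [List.getLast!]
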